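-- pv_equiv track=rewrite | github.com/whitepaper2/algoDiary | algo-challenge/2.7.2-crazyRows.py | crazyRows
-- ===== SOURCE A (Python) =====
-- from typing import List
--
-- def crazyRows(mat: List[List[int]]) -> int:
--     """
--     交换相邻行，得到下三角矩阵，求最少的交换次数
--     :param mat:
--     :return:
--     """
--     N = len(mat)
--     res = 0
--     position = [-1] * N
--     for i in range(N):
--         for j in range(N):
--             if mat[i][j] == 0:
--                 position[i] = j - 1
--                 break
--     for i in range(N):
--         pos = -1
--         for j in range(i, N):
--             if position[j] <= i:
--                 pos = j
--                 break
--         for k in range(pos, i, -1):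
--             position[k], position[k - 1] = position[k - 1], position[k]
--             res += 1
--     return res
-- ===== SOURCE B (Python) =====
-- def crazyRows(mat):
--     N = len(mat)
--     pool = []
--     for row in mat:
--         req = -1
--         for j in range(N):
--             if row[j] == 0:
--                 req = j - 1
--                 break
--         pool.append(req)
--     res = 0
--     for i in range(N):
--         for off, v in enumerate(pool):
--             if v <= i:
--                 res += off
--                 pool.pop(off)
--                 break
--         else:
--             pool.pop(0)
--     return res
-- ===== Notes on version B (the rewrite author's own statement) =====
-- stated objective: alternative
-- what changed: B replaces A's fixed position array with an absolute-index find followed by a nested adjacent-swap bubble loop by a shrinking pool: one enumerate scan finds the first requirement <= i, its offset is added to the result and the element is popped (pool.pop(0) when none qualifies), so the inner swap loop disappears.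
import Mathlib
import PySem

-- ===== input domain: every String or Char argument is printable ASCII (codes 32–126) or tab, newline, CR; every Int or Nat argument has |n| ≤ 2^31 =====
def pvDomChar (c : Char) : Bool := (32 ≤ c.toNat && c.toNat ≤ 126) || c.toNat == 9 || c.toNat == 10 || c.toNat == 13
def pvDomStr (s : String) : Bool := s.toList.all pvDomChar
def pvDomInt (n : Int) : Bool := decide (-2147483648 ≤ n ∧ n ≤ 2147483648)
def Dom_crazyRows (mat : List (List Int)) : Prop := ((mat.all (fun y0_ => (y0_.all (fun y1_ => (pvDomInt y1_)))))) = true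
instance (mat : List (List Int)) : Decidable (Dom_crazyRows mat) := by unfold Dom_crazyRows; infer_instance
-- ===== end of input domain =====

-- B replaces A's in-place array with nested find/bubble-swap loops by a shrinking pool that is
-- scanned once and popped (objective: alternative decomposition, same asymptotic cost).
-- Pre_ excludes exactly the inputs where the Python A raises IndexError (a row shorter than the
-- matrix height containing no zero); B raises there too.

-- ===== PORT A =====

-- inner 'for j in range(N): if mat[i][j] == 0: position[i] = j-1; break'.
-- Python raises IndexError when j reaches len(row) < N without a zero; those inputs are outside
-- Pre_; the port's getD default 1 (≠ 0) is never the value used inside Pre_.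
def fzA (row : List Int) (j fuel : Nat) : Int :=
  match fuel with
  | 0 => -1
  | f + 1 => if row.getD j 1 == 0 then (j : Int) - 1 else fzA row (j + 1) f

-- position[k], position[k-1] = position[k-1], position[k]  (both reads before the writes)
def swapA (l : List Int) (k : Nat) : List Int :=
  (l.set k (l.getD (k - 1) 0)).set (k - 1) (l.getD k 0)

-- 'for k in range(pos, i, -1): swap; res += 1' — cnt iterations, k descending
def bubbleA (st : List Int × Int) (k cnt : Nat) : List Int × Int :=
  match cnt with
  | 0 => st
  | c + 1 => bubbleA (swapA st.1 k, st.2 + 1) (k - 1) c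

-- 'pos = -1; for j in range(i, N): if position[j] <= i: pos = j; break'
def findA (position : List Int) (i j fuel : Nat) : Int :=
  match fuel with
  | 0 => -1
  | f + 1 => if position.getD j 0 ≤ (i : Int) then (j : Int) else findA position i (j + 1) f

-- 'for i in range(N): …' (range(pos, i, -1) has (pos - i).toNat iterations; 0 when pos = -1)
def loopA (N : Nat) (position : List Int) (res : Int) (i fuel : Nat) : Int :=
  match fuel with
  | 0 => res
  | f + 1 =>
    let pos := findA position i i (N - i)
    let cnt := (pos - (i : Int)).toNat
    let st := bubbleA (position, res) pos.toNat cnt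
    loopA N st.1 st.2 (i + 1) f

-- 'for i in range(N): position[i] = …' over rows mat[i], i.e. a map over the N rows of mat
def crazyRows (mat : List (List Int)) : Int :=
  let N := mat.length
  let position := mat.map (fun row => fzA row 0 N)
  loopA N position 0 0 N

-- ===== PORT B =====

-- B's inner 'req = -1; for j in range(N): if row[j] == 0: req = j - 1; break' — the same scan as
-- A's (it raises IndexError on the same inputs, outside Pre_; default 1 ≠ 0 never used inside Pre_)
def reqB (row : List Int) (j fuel : Nat) : Int :=
  match fuel with
  | 0 => -1
  | f + 1 => if row.getD j 1 == 0 then (j : Int) - 1 else reqB row (j + 1) f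

-- 'for off, v in enumerate(pool): if v <= i: … pool.pop(off); break' — returns the offset of the
-- first element ≤ i together with the pool after popping it, or none
def stepB (i : Int) : List Int → Option (Nat × List Int)
  | [] => none
  | v :: vs =>
    if v ≤ i then some (0, vs)
    else match stepB i vs with
      | some (off, rest) => some (off + 1, v :: rest)
      | none => none

-- 'for i in range(N): … else: pool.pop(0)'
def loopB (pool : List Int) (res : Int) (i fuel : Nat) : Int :=
  match fuel with
  | 0 => res
  | f + 1 =>
    match stepB (i : Int) pool with
    | some (off, rest) => loopB rest (res + (off : Int)) (i + 1) f
    | none => loopB (pool.drop 1) res (i + 1) f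

def crazyRows_alt (mat : List (List Int)) : Int :=
  let N := mat.length
  loopB (mat.map (fun row => reqB row 0 N)) 0 0 N

-- ===== PRECONDITION & SPEC =====
-- Pre_ admits exactly the inputs where Python A returns: each row either has at least N entries
-- or contains a zero; otherwise A's (and B's) inner scan raises IndexError.
def Pre_crazyRows (mat : List (List Int)) : Prop :=
  ∀ row ∈ mat, mat.length ≤ row.length ∨ (0 : Int) ∈ row
instance (mat : List (List Int)) : Decidable (Pre_crazyRows mat) := by
  unfold Pre_crazyRows; infer_instance

def pvWitness_crazyRows : List (List Int) := [[1, 0], [0, 2]]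

def Spec_crazyRows (mat : List (List Int)) (out : Int) : Prop := out = crazyRows_alt mat
instance (mat : List (List Int)) (out : Int) : Decidable (Spec_crazyRows mat out) := by
  unfold Spec_crazyRows; infer_instance

-- ===== CLAIM (what is proved, stated in full; the proofs are below) =====
def Claim_equal_crazyRows : Prop :=
  ∀ (mat : List (List Int)), Dom_crazyRows mat → Pre_crazyRows mat →
    Spec_crazyRows mat (crazyRows mat)

-- ===== LEMMAS AND PROOFS =====

theorem fzA_eq_reqB (fuel : Nat) : ∀ (j : Nat) (row : List Int),
    fzA row j fuel = reqB row j fuel := by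
  induction fuel with
  | zero => intro j row; rfl
  | succ f ih =>
    intro j row
    rw [fzA, reqB]
    by_cases h : row.getD j 1 == 0 <;> simp [ih]

-- stepB characterization
theorem stepB_some (i : Int) (pool : List Int) : ∀ (off : Nat) (rest : List Int),
    stepB i pool = some (off, rest) →
    off < pool.length ∧ rest = pool.eraseIdx off := by
  induction pool with
  | nil => intro off rest h; simp [stepB] at h
  | cons v vs ih =>
    intro off rest h
    rw [stepB] at h
    by_cases hv : v ≤ i
    · rw [if_pos hv] at h
      obtain ⟨h1, h2⟩ := Prod.mk.injEq .. ▸ Option.some.injEq .. ▸ h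
      cases h; simp
    · rw [if_neg hv] at h
      cases hs : stepB i vs with
      | none => rw [hs] at h; simp at h
      | some p =>
        rw [hs] at h
        obtain ⟨off', rest'⟩ := p
        simp only [Option.some.injEq, Prod.mk.injEq] at h
        obtain ⟨ho, hr⟩ := h
        obtain ⟨hlt, he⟩ := ih off' rest' hs
        subst ho hr
        constructor
        · simpa using Nat.succ_lt_succ hlt
        · simp [List.eraseIdx_cons_succ, he]

-- findA over pre ++ pool starting at j = pre.length computes stepB's offset
theorem findA_stepB (pool : List Int) (pre : List Int) (i : Nat) :
    findA (pre ++ pool) i pre.length pool.length =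
      (match stepB (i : Int) pool with
       | none => -1
       | some (off, _) => ((pre.length + off : Nat) : Int)) := by
  induction pool generalizing pre with
  | nil => simp [findA, stepB]
  | cons v vs ih =>
    have hget : (pre ++ v :: vs).getD pre.length 0 = v := by
      simp [List.getD]
    rw [List.length_cons, findA, hget]
    by_cases hv : v ≤ (i : Int)
    · rw [if_pos hv, stepB, if_pos hv]
      simp
    · rw [if_neg hv, stepB, if_neg hv]
      have hra : pre ++ v :: vs = (pre ++ [v]) ++ vs := by simp
      have hl : pre.length + 1 = (pre ++ [v]).length := by simp
      rw [hra, hl, ih (pre ++ [v])]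
      cases hs : stepB (i : Int) vs with
      | none => simp
      | some p =>
        obtain ⟨off, rest⟩ := p
        simp only [List.length_append, List.length_cons, List.length_nil]
        push_cast
        ring_nf

theorem swapA_length (l : List Int) (k : Nat) : (swapA l k).length = l.length := by
  simp [swapA]

theorem swapA_append (pre l : List Int) (k : Nat) (h1 : 1 ≤ k) :
    swapA (pre ++ l) (pre.length + k) = pre ++ swapA l k := by
  unfold swapA
  have g1 : (pre ++ l).getD (pre.length + k - 1) 0 = l.getD (k - 1) 0 := by
    have : pre.length + k - 1 = pre.length + (k - 1) := by omega
    rw [this]; simp [List.getD, List.getElem?_append_right (Nat.le_add_right _ _)]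
  have g2 : (pre ++ l).getD (pre.length + k) 0 = l.getD k 0 := by
    simp [List.getD, List.getElem?_append_right (Nat.le_add_right _ _)]
  rw [g1, g2, List.set_append_right _ _ (by omega), List.set_append_right _ _ (by omega)]
  rw [show pre.length + k - pre.length = k from by omega,
      show pre.length + k - 1 - pre.length = k - 1 from by omega]

theorem bubbleA_append (c : Nat) (pre l : List Int) (r : Int) (k : Nat)
    (hck : c ≤ k) (hk : k < l.length) :
    bubbleA (pre ++ l, r) (pre.length + k) c =
      ((pre ++ (bubbleA (l, r) k c).1, (bubbleA (l, r) k c).2)) := by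
  induction c generalizing l r k with
  | zero => rfl
  | succ c ih =>
    rw [bubbleA, bubbleA]
    have hk1 : 1 ≤ k := by omega
    rw [swapA_append pre l k hk1]
    have : pre.length + k - 1 = pre.length + (k - 1) := by omega
    rw [this]
    exact ih (swapA l k) (r + 1) (k - 1) (by omega) (by rw [swapA_length]; omega)

theorem bubbleL (off : Nat) (l : List Int) (r : Int) (h : off < l.length) :
    bubbleA (l, r) off off = (l[off] :: l.eraseIdx off, r + off) := by
  induction off generalizing l r with
  | zero =>
    cases l with
    | nil => simp at h
    | cons a t => simp [bubbleA]
  | succ off ih =>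
    rw [bubbleA]
    have hlen : off < (swapA l (off + 1)).length := by rw [swapA_length]; omega
    rw [Nat.add_sub_cancel, ih (swapA l (off + 1)) (r + 1) hlen]
    have hg1 : (swapA l (off + 1))[off] = l[off + 1] := by
      simp [swapA, List.getD, List.getElem?_eq_getElem h,
        List.getElem?_eq_getElem (by omega : off < l.length)]
    have hg2 : (swapA l (off + 1)).eraseIdx off = l.eraseIdx (off + 1) := by
      apply List.ext_getElem
      · simp only [swapA, List.length_eraseIdx, List.length_set]
        rw [if_pos (by omega : off < l.length), if_pos h]
      · intro n hn1 hn2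
        rw [List.getElem_eraseIdx, List.getElem_eraseIdx]
        by_cases hno : n < off
        · rw [dif_pos hno, dif_pos (by omega)]
          have e1 : off ≠ n := by omega
          have e2 : off + 1 ≠ n := by omega
          simp [swapA, e1, e2]
        · by_cases hne : n = off
          · subst hne
            rw [dif_neg hno, dif_pos (by omega)]
            simp [swapA, List.getD, List.getElem?_eq_getElem (by omega : n < l.length)]
          · rw [dif_neg hno, dif_neg (by omega)]
            have e1 : off ≠ n + 1 := by omega
            have e2 : off + 1 ≠ n + 1 := by omega
            have e3 : off ≠ n := by omega
            simp [swapA, e1, e3]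
    rw [hg1, hg2]
    have : r + 1 + (off : Int) = r + ((off : Nat) + 1 : Nat) := by push_cast; ring
    rw [this]

theorem loop_main (fuel : Nat) : ∀ (i : Nat) (position : List Int) (res : Int),
    position.length = i + fuel →
    loopA (i + fuel) position res i fuel = loopB (position.drop i) res i fuel := by
  induction fuel with
  | zero => intro i position res h; rfl
  | succ f ih =>
    intro i position res h
    have hi : i ≤ position.length := by omega
    have htd : position.take i ++ position.drop i = position := List.take_append_drop i position
    have hlt : (position.take i).length = i := by simp [List.length_take]; omega
    have hld : (position.drop i).length = f + 1 := by simp [List.length_drop]; omega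
    have hfind : findA position i i (f + 1) =
        (match stepB (i : Int) (position.drop i) with
         | none => -1
         | some (off, _) => ((i + off : Nat) : Int)) := by
      have hfs := findA_stepB (position.drop i) (position.take i) i
      rw [htd, hlt, hld] at hfs
      exact hfs
    have hNi : i + (f + 1) - i = f + 1 := by omega
    rw [loopA, loopB, hNi, hfind]
    cases hs : stepB (i : Int) (position.drop i) with
    | none =>
      simp only
      have hcnt : ((-1 : Int) - (i : Nat)).toNat = 0 := by omega
      rw [hcnt]
      have hdd : (position.drop i).drop 1 = position.drop (i + 1) := by
        rw [List.drop_drop]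
      rw [hdd]
      have hperm : i + (f + 1) = (i + 1) + f := by omega
      rw [show bubbleA (position, res) ((-1 : Int)).toNat 0 = (position, res) from rfl,
        hperm]
      exact ih (i + 1) position res (by omega)
    | some p =>
      obtain ⟨off, rest⟩ := p
      simp only
      obtain ⟨hofflt, hrest⟩ := stepB_some (i : Int) (position.drop i) off rest hs
      have hcnt : ((((i + off : Nat) : Int)) - (i : Nat)).toNat = off := by
        push_cast; omega
      have htn : (((i + off : Nat) : Int)).toNat = i + off := by omega
      rw [hcnt, htn]
      have hb : bubbleA (position, res) (i + off) off =
          (position.take i ++ (position.drop i)[off] :: (position.drop i).eraseIdx off,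
            res + off) := by
        have hba := bubbleA_append off (position.take i) (position.drop i) res off
          (le_refl off) hofflt
        rw [bubbleL off (position.drop i) res hofflt] at hba
        rw [htd, hlt] at hba
        exact hba
      rw [hb]
      have hlen' : (position.take i ++ (position.drop i)[off] ::
          (position.drop i).eraseIdx off).length = (i + 1) + f := by
        rw [List.length_append, hlt, List.length_cons, List.length_eraseIdx_of_lt hofflt, hld]
        omega
      have hdrop : (position.take i ++ (position.drop i)[off] ::
          (position.drop i).eraseIdx off).drop (i + 1) = (position.drop i).eraseIdx off := by
        rw [show i + 1 = (position.take i).length + 1 from by rw [hlt]]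
        simp [List.drop_append]
      have hperm : i + (f + 1) = (i + 1) + f := by omega
      rw [hperm, ih (i + 1) _ (res + off) hlen', hdrop, hrest]

-- ===== VERDICT (by name: the statement is the Claim_ definition above) =====
theorem crazyRows_spec : Claim_equal_crazyRows := by
  intro mat _ _
  show crazyRows mat = crazyRows_alt mat
  simp only [crazyRows, crazyRows_alt]
  have hmap : mat.map (fun row => fzA row 0 mat.length) =
      mat.map (fun row => reqB row 0 mat.length) :=
    List.map_congr_left (fun row _ => fzA_eq_reqB mat.length 0 row)
  rw [hmap]
  have := loop_main mat.length 0 (mat.map (fun row => reqB row 0 mat.length)) 0 (by simp)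
  simpa using this
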